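-- pv_equiv track=rewrite | github.com/shreyan2020/rift-rewind | create_journey.py | choose_region_arc
-- ===== SOURCE A (Python) =====
-- def choose_region_arc(values: dict, quarter_num: int) -> str:
--     """
--     Choose the region arc based on dominant Schwartz values.
--
--     Excludes Universalism for Q1, Q2, Q4 to ensure variety.
--     """
--     # Define region mapping
--     region_map = {
--         "Security": "Demacia",
--         "Conformity": "Demacia",
--         "Tradition": "Ionia",
--         "Benevolence": "Ionia",
--         "Universalism": "Targon",
--         "Self-Direction": "Piltover",
--         "Stimulation": "Bilgewater",
--         "Hedonism": "Zaun",
--         "Achievement": "Noxus",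
--         "Power": "Noxus"
--     }
--
--     # For variety, exclude Universalism for most quarters
--     # Only allow it in Q3 (to ensure we see different regions)
--     exclude_universalism = quarter_num in [1, 2, 4]
--
--     # Get top 3 values
--     sorted_values = sorted(values.items(), key=lambda x: x[1], reverse=True)
--
--     # Filter out Universalism if needed
--     if exclude_universalism:
--         sorted_values = [(k, v) for k, v in sorted_values if k != "Universalism"]
--
--     # Pick the highest value
--     if sorted_values:
--         top_value = sorted_values[0][0]
--         return region_map.get(top_value, "Runeterra")
--
--     return "Runeterra"
-- ===== SOURCE B (Python) =====
-- def choose_region_arc(values: dict, quarter_num: int) -> str: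
--     """Filter eligible items once, take the first max (no sort), map key to region by a branch chain."""
--     exclude = quarter_num in (1, 2, 4)
--     eligible = [(k, v) for k, v in values.items() if not (exclude and k == "Universalism")]
--     if not eligible:
--         return "Runeterra"
--     key = max(eligible, key=lambda kv: kv[1])[0]
--     if key == "Security" or key == "Conformity":
--         return "Demacia"
--     if key == "Tradition" or key == "Benevolence":
--         return "Ionia"
--     if key == "Universalism":
--         return "Targon"
--     if key == "Self-Direction":
--         return "Piltover"
--     if key == "Stimulation":
--         return "Bilgewater"
--     if key == "Hedonism":
--         return "Zaun"
--     if key == "Achievement" or key == "Power":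
--         return "Noxus"
--     return "Runeterra"
-- ===== Notes on version B (the rewrite author's own statement) =====
-- stated objective: alternative
-- what changed: Replaces the full descending sort plus dict lookup by a single filter-then-first-max pass (Python max keeps the first maximum, matching the stable sort's head) and maps the winning key to its region with a plain branch chain instead of the region dict.
import Mathlib
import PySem

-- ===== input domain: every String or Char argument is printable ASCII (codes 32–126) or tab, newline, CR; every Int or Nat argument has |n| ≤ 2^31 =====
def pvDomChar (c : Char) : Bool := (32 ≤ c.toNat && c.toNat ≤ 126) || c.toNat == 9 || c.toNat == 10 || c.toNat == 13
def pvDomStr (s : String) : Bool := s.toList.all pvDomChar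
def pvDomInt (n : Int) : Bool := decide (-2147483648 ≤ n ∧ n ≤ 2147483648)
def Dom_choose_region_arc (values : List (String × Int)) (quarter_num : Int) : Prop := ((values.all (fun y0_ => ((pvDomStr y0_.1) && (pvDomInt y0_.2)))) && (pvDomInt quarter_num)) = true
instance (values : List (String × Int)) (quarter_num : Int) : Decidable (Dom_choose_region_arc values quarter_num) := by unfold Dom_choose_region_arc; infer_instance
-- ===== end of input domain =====

-- B replaces A's full descending sort + region dict by one filter, a single first-max pass and a branch-chain region lookup; objective: alternative (linear pass instead of a sort; not measured faster).

-- ===== PORT A =====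
def regionMapA : PySem.Dict String String := PySem.Dict.mk
  [("Security", "Demacia"), ("Conformity", "Demacia"), ("Tradition", "Ionia"),
   ("Benevolence", "Ionia"), ("Universalism", "Targon"), ("Self-Direction", "Piltover"),
   ("Stimulation", "Bilgewater"), ("Hedonism", "Zaun"), ("Achievement", "Noxus"),
   ("Power", "Noxus")]

def choose_region_arc (values : List (String × Int)) (quarter_num : Int) : String :=
  let exclude_universalism := [(1 : Int), 2, 4].contains quarter_num
  let sorted_values := PySem.List.sorted values (fun x => x.2) true
  let sorted_values :=
    if exclude_universalism then sorted_values.filter (fun kv => !(kv.1 == "Universalism"))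
    else sorted_values
  match sorted_values with
  | [] => "Runeterra"
  | (k, _) :: _ => regionMapA.getD k "Runeterra"

-- ===== PORT B =====
def regionOf (key : String) : String :=
  if key == "Security" || key == "Conformity" then "Demacia"
  else if key == "Tradition" || key == "Benevolence" then "Ionia"
  else if key == "Universalism" then "Targon"
  else if key == "Self-Direction" then "Piltover"
  else if key == "Stimulation" then "Bilgewater"
  else if key == "Hedonism" then "Zaun"
  else if key == "Achievement" || key == "Power" then "Noxus"
  else "Runeterra"

def choose_region_arc_alt (values : List (String × Int)) (quarter_num : Int) : String :=
  let exclude := [(1 : Int), 2, 4].contains quarter_num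
  let eligible := values.filter (fun kv => !(exclude && kv.1 == "Universalism"))
  match PySem.List.max? eligible (fun kv => kv.2) with
  | none => "Runeterra"
  | some (k, _) => regionOf k

-- ===== PRECONDITION & SPEC =====
def Spec_choose_region_arc (values : List (String × Int)) (quarter_num : Int) (out : String) : Prop := out = choose_region_arc_alt values quarter_num
instance (values : List (String × Int)) (quarter_num : Int) (out : String) : Decidable (Spec_choose_region_arc values quarter_num out) := by unfold Spec_choose_region_arc; infer_instance

-- ===== CLAIM =====
def Claim_equal_choose_region_arc : Prop := ∀ (values : List (String × Int)) (quarter_num : Int), Dom_choose_region_arc values quarter_num → Spec_choose_region_arc values quarter_num (choose_region_arc values quarter_num)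

-- ===== LEMMAS AND PROOFS =====

lemma sorted_append_singleton {α : Type} (xs : List α) (x : α) (key : α → Int) :
    PySem.List.sorted (xs ++ [x]) key true
      = PySem.List.insertBy (fun a b => decide (key b < key a)) x (PySem.List.sorted xs key true) := by
  simp [PySem.List.sorted, List.foldl_append]

lemma max?_append_singleton {α : Type} (xs : List α) (x : α) (key : α → Int) :
    PySem.List.max? (xs ++ [x]) key
      = match PySem.List.max? xs key with
        | none => some x
        | some m => if key m < key x then some x else some m := by
  simp only [PySem.List.max?, List.foldl_append, List.foldl_cons, List.foldl_nil]
  split <;> rename_i h <;> rw [h]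

-- head of the stable descending sort is the FIRST maximal element
lemma head?_sorted_rev {α : Type} (xs : List α) (key : α → Int) :
    (PySem.List.sorted xs key true).head? = PySem.List.max? xs key := by
  induction xs using List.reverseRecOn with
  | nil => rfl
  | append_singleton xs x ih =>
    rw [sorted_append_singleton, max?_append_singleton]
    cases hs : PySem.List.sorted xs key true with
    | nil =>
      rw [hs] at ih
      rw [← ih]
      simp [PySem.List.insertBy]
    | cons y ys =>
      rw [hs] at ih
      rw [← ih]
      by_cases h : key y < key x <;> simp [PySem.List.insertBy, h]

lemma insertBy_cons_of_lt {α : Type} (x : α) (key : α → Int) (l : List α)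
    (h : ∀ z ∈ l, key z < key x) :
    PySem.List.insertBy (fun a b => decide (key b < key a)) x l = x :: l := by
  cases l with
  | nil => rfl
  | cons z zs => simp [PySem.List.insertBy, h z (by simp)]

lemma filter_insertBy {α : Type} (p : α → Bool) (x : α) (key : α → Int) (s : List α)
    (hs : s.Pairwise (fun a b => key b ≤ key a)) :
    (PySem.List.insertBy (fun a b => decide (key b < key a)) x s).filter p
      = if p x then PySem.List.insertBy (fun a b => decide (key b < key a)) x (s.filter p)
        else s.filter p := by
  induction s with
  | nil => cases hpx : p x <;> simp [PySem.List.insertBy, hpx]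
  | cons y ys ih =>
    have hy : ∀ z ∈ ys, key z ≤ key y := (List.pairwise_cons.mp hs).1
    have hys : ys.Pairwise (fun a b => key b ≤ key a) := (List.pairwise_cons.mp hs).2
    by_cases h : key y < key x
    · cases hpx : p x with
      | false =>
        simp only [PySem.List.insertBy, h, decide_true, if_true]
        simp [List.filter_cons, hpx]
      | true =>
        simp only [PySem.List.insertBy, h, decide_true, if_true]
        rw [List.filter_cons_of_pos hpx]
        rw [insertBy_cons_of_lt x key ((y :: ys).filter p)]
        intro z hz
        have hzm : z ∈ y :: ys := List.mem_of_mem_filter hz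
        rcases List.mem_cons.mp hzm with rfl | hzys
        · exact h
        · exact lt_of_le_of_lt (hy z hzys) h
    · simp only [PySem.List.insertBy, decide_eq_true_eq, h, if_false]
      cases hpy : p y with
      | true =>
        rw [List.filter_cons_of_pos hpy, ih hys, List.filter_cons_of_pos hpy]
        cases hpx : p x with
        | true =>
          simp only [if_true]
          rw [show PySem.List.insertBy (fun a b => decide (key b < key a)) x (y :: ys.filter p)
                = y :: PySem.List.insertBy (fun a b => decide (key b < key a)) x (ys.filter p) by
              simp [PySem.List.insertBy, h]]
        | false => simp
      | false =>
        rw [List.filter_cons_of_neg (by simp [hpy]), ih hys, List.filter_cons_of_neg (by simp [hpy])]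

-- filtering commutes with the stable sort
lemma filter_sorted_rev {α : Type} (p : α → Bool) (xs : List α) (key : α → Int) :
    (PySem.List.sorted xs key true).filter p = PySem.List.sorted (xs.filter p) key true := by
  induction xs using List.reverseRecOn with
  | nil => rfl
  | append_singleton xs x ih =>
    rw [sorted_append_singleton,
        filter_insertBy p x key _ (PySem.List.sorted_pairwise_rev xs (key := key)), ih,
        List.filter_append]
    cases hpx : p x with
    | true => simp [hpx, sorted_append_singleton]
    | false => simp [hpx]

-- the region dict lookup agrees with B's branch chain, for every key
lemma getD_regionMapA (k : String) : regionMapA.getD k "Runeterra" = regionOf k := by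
  by_cases h1 : k = "Security"; · subst h1; decide
  by_cases h2 : k = "Conformity"; · subst h2; decide
  by_cases h3 : k = "Tradition"; · subst h3; decide
  by_cases h4 : k = "Benevolence"; · subst h4; decide
  by_cases h5 : k = "Universalism"; · subst h5; decide
  by_cases h6 : k = "Self-Direction"; · subst h6; decide
  by_cases h7 : k = "Stimulation"; · subst h7; decide
  by_cases h8 : k = "Hedonism"; · subst h8; decide
  by_cases h9 : k = "Achievement"; · subst h9; decide
  by_cases h10 : k = "Power"; · subst h10; decide
  have f : ∀ s : String, k ≠ s → (s == k) = false := fun s h => beq_eq_false_iff_ne.mpr (Ne.symm h)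
  simp only [regionMapA, regionOf, PySem.Dict.getD, PySem.Dict.get?, List.find?,
    f _ h1, f _ h2, f _ h3, f _ h4, f _ h5, f _ h6, f _ h7, f _ h8, f _ h9, f _ h10]
  simp [h1, h2, h3, h4, h5, h6, h7, h8, h9, h10]

-- ===== VERDICT (by name: the statement is the Claim_ definition above) =====
theorem choose_region_arc_spec : Claim_equal_choose_region_arc := by
  intro values quarter_num _
  unfold Spec_choose_region_arc
  simp only [choose_region_arc, choose_region_arc_alt]
  cases he : [(1 : Int), 2, 4].contains quarter_num with
  | false =>
    simp only [Bool.false_eq_true, if_false, Bool.false_and, Bool.not_false, List.filter_true]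
    rw [← head?_sorted_rev]
    cases hs : PySem.List.sorted values (fun x : String × Int => x.2) true with
    | nil => rfl
    | cons y ys => obtain ⟨k, v⟩ := y; exact getD_regionMapA k
  | true =>
    simp only [if_true, Bool.true_and]
    rw [← head?_sorted_rev, ← filter_sorted_rev]
    cases hs : (PySem.List.sorted values (fun x : String × Int => x.2) true).filter
        (fun kv => !(kv.1 == "Universalism")) with
    | nil => rfl
    | cons y ys => obtain ⟨k, v⟩ := y; exact getD_regionMapA k
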